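-- pv_equiv track=rewrite | github.com/dinger4/DeQoG | src/tools/knowledge_search.py | _categorize_pattern
-- ===== SOURCE A (Python) =====
-- def _categorize_pattern(pattern_name: str) -> str:
--     """Categorize a pattern."""
--     categories = {
--         'optimization': ['dynamic_programming', 'greedy'],
--         'search': ['binary_search', 'graph_traversal', 'backtracking'],
--         'divide': ['divide_and_conquer'],
--         'pointer': ['two_pointers', 'sliding_window']
--     }
--
--     for category, patterns in categories.items():
--         if pattern_name in patterns:
--             return category
--
--     return 'other'
-- ===== SOURCE B (Python) =====
-- _PATTERN_TO_CATEGORY = {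
--     'dynamic_programming': 'optimization',
--     'greedy': 'optimization',
--     'binary_search': 'search',
--     'graph_traversal': 'search',
--     'backtracking': 'search',
--     'divide_and_conquer': 'divide',
--     'two_pointers': 'pointer',
--     'sliding_window': 'pointer',
-- }
--
-- def _categorize_pattern(pattern_name: str) -> str:
--     """Categorize a pattern via a pre-inverted flat lookup table."""
--     return _PATTERN_TO_CATEGORY.get(pattern_name, 'other')
-- ===== Notes on version B (the rewrite author's own statement) =====
-- stated objective: idiomatic
-- what changed: Replaced the loop over category->pattern-list pairs with list membership tests by a single pre-inverted pattern->category dictionary and one .get lookup with the same default fallback (no loop).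
import Mathlib
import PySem

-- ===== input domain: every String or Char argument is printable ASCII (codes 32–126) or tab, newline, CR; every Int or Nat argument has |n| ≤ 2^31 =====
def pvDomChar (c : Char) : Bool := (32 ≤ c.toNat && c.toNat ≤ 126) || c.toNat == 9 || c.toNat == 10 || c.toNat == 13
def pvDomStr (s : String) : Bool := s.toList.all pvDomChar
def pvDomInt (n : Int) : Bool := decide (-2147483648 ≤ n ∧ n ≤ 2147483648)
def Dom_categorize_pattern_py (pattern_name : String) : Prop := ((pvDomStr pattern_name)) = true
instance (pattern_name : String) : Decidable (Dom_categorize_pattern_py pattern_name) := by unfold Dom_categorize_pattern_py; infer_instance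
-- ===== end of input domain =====

-- B replaces A's loop over category→pattern-list pairs by one lookup in a pre-inverted
-- pattern→category dictionary (idiomatic; no loop).

-- ===== PORT A =====
-- the dict literal `categories`, as its items list (insertion order)
def pvCategories : List (String × List String) :=
  [("optimization", ["dynamic_programming", "greedy"]),
   ("search", ["binary_search", "graph_traversal", "backtracking"]),
   ("divide", ["divide_and_conquer"]),
   ("pointer", ["two_pointers", "sliding_window"])]

-- the `for category, patterns in categories.items(): if pattern_name in patterns: return category` loop
def pvCatLoop (pattern_name : String) : List (String × List String) → String
  | [] => "other"
  | (category, patterns) :: rest =>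
      if patterns.contains pattern_name then category else pvCatLoop pattern_name rest

def categorize_pattern_py (pattern_name : String) : String :=
  pvCatLoop pattern_name pvCategories

-- ===== PORT B =====
def pvPatternToCategory : PySem.Dict String String :=
  PySem.Dict.ofList
    [("dynamic_programming", "optimization"),
     ("greedy", "optimization"),
     ("binary_search", "search"),
     ("graph_traversal", "search"),
     ("backtracking", "search"),
     ("divide_and_conquer", "divide"),
     ("two_pointers", "pointer"),
     ("sliding_window", "pointer")]

def categorize_pattern_py_alt (pattern_name : String) : String :=
  PySem.Dict.getD pvPatternToCategory pattern_name "other"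

-- ===== PRECONDITION & SPEC =====
def Spec_categorize_pattern_py (pattern_name : String) (out : String) : Prop := out = categorize_pattern_py_alt pattern_name
instance (pattern_name : String) (out : String) : Decidable (Spec_categorize_pattern_py pattern_name out) := by unfold Spec_categorize_pattern_py; infer_instance

-- ===== CLAIM (what is proved, stated in full; the proofs are below) =====
def Claim_equal_categorize_pattern_py : Prop := ∀ (pattern_name : String), Dom_categorize_pattern_py pattern_name → Spec_categorize_pattern_py pattern_name (categorize_pattern_py pattern_name)

-- ===== LEMMAS AND PROOFS =====

-- ===== VERDICT (by name: the statement is the Claim_ definition above) =====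
theorem categorize_pattern_py_spec : Claim_equal_categorize_pattern_py := by
  intro s _
  unfold Spec_categorize_pattern_py
  have hd : pvPatternToCategory = PySem.Dict.mk
      [("dynamic_programming", "optimization"), ("greedy", "optimization"),
       ("binary_search", "search"), ("graph_traversal", "search"),
       ("backtracking", "search"), ("divide_and_conquer", "divide"),
       ("two_pointers", "pointer"), ("sliding_window", "pointer")] := by decide
  by_cases h1 : s = "dynamic_programming"; · subst h1; decide
  by_cases h2 : s = "greedy"; · subst h2; decide
  by_cases h3 : s = "binary_search"; · subst h3; decide
  by_cases h4 : s = "graph_traversal"; · subst h4; decide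
  by_cases h5 : s = "backtracking"; · subst h5; decide
  by_cases h6 : s = "divide_and_conquer"; · subst h6; decide
  by_cases h7 : s = "two_pointers"; · subst h7; decide
  by_cases h8 : s = "sliding_window"; · subst h8; decide
  unfold categorize_pattern_py categorize_pattern_py_alt pvCategories pvCatLoop
  rw [hd]
  simp [pvCatLoop, PySem.Dict.getD, PySem.Dict.get?,
    h1, h2, h3, h4, h5, h6, h7, h8, Ne.symm h1, Ne.symm h2, Ne.symm h3, Ne.symm h4,
    Ne.symm h5, Ne.symm h6, Ne.symm h7, Ne.symm h8]
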